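-- pv_equiv track=rewrite | github.com/SacredAntwon/CPSC-362-StockStrategies | stockinfo.py | separateStrategies
-- ===== SOURCE A (Python) =====
-- def separateStrategies(ticker_strategy):
--
--     # TODO: Find a way to make this function return an array of all strategies AND the number
--     #       of tickers belonging to each strategy (probably using a multi-dimensional array)
--
--     # This is the list that stores each strategy in ticker_strategy
--     strategyList = []
--
--     # The list of tickers for each corresponding strategy
--     tickerList = []
--
--     # Whether or not the strategy was found in the strategyList
--     strategyWasFound = False
--
--     # Iterate through every ticker sub-array in ticker_strategy
--     for i in range(len(ticker_strategy)):
--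
--         for j in range(len(strategyList)):
--
--             if ticker_strategy[i][1] == strategyList[j]:
--
--                 # We found the strategy
--                 strategyWasFound = True
--
--                 # At index j, append the new ticker
--                 tickerList[j].append(ticker_strategy[i][0])
--
--         # Check if the strategy wasn't found
--         if not strategyWasFound:
--
--             # Append the new strategy to the strategyList
--             strategyList.append(ticker_strategy[i][1])
--
--             # Append the first ticker (inside a list) to the tickerList
--             tickerList.append([ticker_strategy[i][0]])
--
--         # Reset the strategyWasFound flag
--         strategyWasFound = False
--
--         """# Check if the strategy associated with the stock isn't registered in strategyList
--         if ticker_strategy[i][1] not in strategyList: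
--
--             # Append the strategy to the strategy list
--             strategyList.append(ticker_strategy[i][1])
--
--             # Append the ticker to the ticker list
--             tickerList.append([ticker_strategy[i][0]])
--
--         # This means the strategy already exists in our strategy list, so we need to find it
--         else:"""
--
--
--     # Return the tickerList (a multi-dimensional array) and strategyList (an array)
--     return tickerList, strategyList
-- ===== SOURCE B (Python) =====
-- def separateStrategies(ticker_strategy):
--     # Pass 1: distinct strategies in first-appearance order.
--     strategyList = []
--     for element in ticker_strategy:
--         if element[1] not in strategyList:
--             strategyList.append(element[1])
--     # Pass 2: for each strategy, gather its tickers in input order.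
--     tickerList = [[p[0] for p in ticker_strategy if p[1] == s] for s in strategyList]
--     return tickerList, strategyList
-- ===== Notes on version B (the rewrite author's own statement) =====
-- stated objective: simpler
-- what changed: B first builds the list of distinct strategies in one pass, then gathers each strategy's tickers with a comprehension per strategy, instead of A's single scan that grows both lists while re-scanning strategyList by index with a found-flag.
import Mathlib
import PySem

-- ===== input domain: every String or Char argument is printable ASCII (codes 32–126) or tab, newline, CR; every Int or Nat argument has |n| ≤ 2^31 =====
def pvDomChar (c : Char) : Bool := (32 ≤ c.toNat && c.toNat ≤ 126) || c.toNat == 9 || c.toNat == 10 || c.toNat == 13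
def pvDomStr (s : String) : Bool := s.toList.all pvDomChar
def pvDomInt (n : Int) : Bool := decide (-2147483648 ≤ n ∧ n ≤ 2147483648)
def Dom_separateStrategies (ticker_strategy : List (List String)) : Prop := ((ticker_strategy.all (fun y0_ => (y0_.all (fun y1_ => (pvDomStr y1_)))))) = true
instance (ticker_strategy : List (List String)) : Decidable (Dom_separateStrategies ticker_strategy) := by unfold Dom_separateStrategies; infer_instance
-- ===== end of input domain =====

-- B groups tickers by strategy in two passes (distinct strategies first, then one gather per strategy)
-- instead of A's single scan growing both lists with an index loop and a found-flag; objective: simpler.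

-- ===== PORT A =====
-- element[1] / element[0] (in range under Pre_)
def pvStratOf (e : List String) : String := PySem.List.pyGetD e 1 ""
def pvTickOf (e : List String) : String := PySem.List.pyGetD e 0 ""

-- the inner 'for j in range(len(strategyList))' loop: state = (tickerList, strategyWasFound)
def pvInnerA (strat tick : String) (strats : List String) (tickers : List (List String)) :
    List (List String) × Bool :=
  (PySem.List.pyRange 0 (strats.length : Int) 1).foldl
    (fun acc j =>
      if PySem.List.pyGetD strats j "" = strat then
        (acc.1.modify j.toNat (· ++ [tick]), true)
      else acc)
    (tickers, false)

-- one iteration of the outer 'for i in range(len(ticker_strategy))' loop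
def pvStepA (st : List (List String) × List String) (e : List String) :
    List (List String) × List String :=
  let r := pvInnerA (pvStratOf e) (pvTickOf e) st.2 st.1
  if r.2 then (r.1, st.2) else (r.1 ++ [[pvTickOf e]], st.2 ++ [pvStratOf e])

def separateStrategies (ticker_strategy : List (List String)) : List (List String) × List String :=
  ticker_strategy.foldl pvStepA ([], [])

-- ===== PORT B =====
-- pass 1: distinct strategies in first-appearance order
def pvDistinct (ticker_strategy : List (List String)) : List String :=
  ticker_strategy.foldl
    (fun acc e => if pvStratOf e ∈ acc then acc else acc ++ [pvStratOf e]) []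

-- pass 2 body: '[p[0] for p in ticker_strategy if p[1] == s]'
def pvGroup (ticker_strategy : List (List String)) (s : String) : List String :=
  (ticker_strategy.filter (fun p => pvStratOf p = s)).map pvTickOf

def separateStrategies_alt (ticker_strategy : List (List String)) : List (List String) × List String :=
  let strategyList := pvDistinct ticker_strategy
  (strategyList.map (pvGroup ticker_strategy), strategyList)

-- ===== PRECONDITION & SPEC =====
-- Pre_ excludes exactly the inputs where Python A raises IndexError (an element shorter than 2).
def Pre_separateStrategies (ticker_strategy : List (List String)) : Prop :=
  ∀ e ∈ ticker_strategy, 2 ≤ e.length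
instance (ticker_strategy : List (List String)) : Decidable (Pre_separateStrategies ticker_strategy) := by unfold Pre_separateStrategies; infer_instance

def pvWitness_separateStrategies : List (List String) :=
  [["AAPL", "buy"], ["MSFT", "hold"], ["GOOG", "buy"]]

def Spec_separateStrategies (ticker_strategy : List (List String)) (out : List (List String) × List String) : Prop := out = separateStrategies_alt ticker_strategy
instance (ticker_strategy : List (List String)) (out : List (List String) × List String) : Decidable (Spec_separateStrategies ticker_strategy out) := by unfold Spec_separateStrategies; infer_instance

-- ===== CLAIM (what is proved, stated in full; the proofs are below) =====
def Claim_equal_separateStrategies : Prop := ∀ (ticker_strategy : List (List String)), Dom_separateStrategies ticker_strategy → Pre_separateStrategies ticker_strategy → Spec_separateStrategies ticker_strategy (separateStrategies ticker_strategy)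

-- ===== LEMMAS AND PROOFS =====

-- membership in the dedup fold
theorem pvMem_distinct_fold (p : List (List String)) (acc : List String) (s : String) :
    s ∈ p.foldl (fun acc e => if pvStratOf e ∈ acc then acc else acc ++ [pvStratOf e]) acc ↔
      s ∈ acc ∨ s ∈ p.map pvStratOf := by
  induction p generalizing acc with
  | nil => simp
  | cons e rest ih =>
    simp only [List.foldl_cons, List.map_cons, List.mem_cons]
    by_cases h : pvStratOf e ∈ acc
    · rw [if_pos h, ih]
      constructor
      · tauto
      · rintro (h1 | h1 | h1)
        · exact Or.inl h1
        · exact Or.inl (h1 ▸ h)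
        · exact Or.inr h1
    · rw [if_neg h, ih]
      simp only [List.mem_append, List.mem_singleton]
      tauto

theorem pvMem_distinct (p : List (List String)) (s : String) :
    s ∈ pvDistinct p ↔ s ∈ p.map pvStratOf := by
  simpa using pvMem_distinct_fold p [] s

theorem pvNodup_distinct_fold (p : List (List String)) (acc : List String) (h : acc.Nodup) :
    (p.foldl (fun acc e => if pvStratOf e ∈ acc then acc else acc ++ [pvStratOf e]) acc).Nodup := by
  induction p generalizing acc with
  | nil => simpa
  | cons e rest ih =>
    simp only [List.foldl_cons]
    by_cases hm : pvStratOf e ∈ acc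
    · simpa [hm] using ih acc h
    · simp only [hm, if_false]
      refine ih _ ?_
      simp only [List.nodup_append, List.nodup_cons, List.nodup_nil, and_true, List.disjoint_singleton]
      exact ⟨h, by simpa using fun a ha hae => hm (by rw [← hae]; exact ha)⟩

theorem pvNodup_distinct (p : List (List String)) : (pvDistinct p).Nodup :=
  pvNodup_distinct_fold p [] (by simp)

theorem pvDistinct_append_singleton (p : List (List String)) (e : List String) :
    pvDistinct (p ++ [e]) =
      if pvStratOf e ∈ pvDistinct p then pvDistinct p else pvDistinct p ++ [pvStratOf e] := by
  simp [pvDistinct, List.foldl_append]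

theorem pvGroup_append_singleton (p : List (List String)) (e : List String) (s : String) :
    pvGroup (p ++ [e]) s =
      pvGroup p s ++ (if pvStratOf e = s then [pvTickOf e] else []) := by
  by_cases h : pvStratOf e = s <;> simp [pvGroup, List.filter_append, h]

theorem pvGroup_eq_nil (p : List (List String)) (s : String) (h : s ∉ pvDistinct p) :
    pvGroup p s = [] := by
  rw [pvMem_distinct] at h
  simp only [pvGroup, List.map_eq_nil_iff, List.filter_eq_nil_iff]
  intro e he hse
  exact h (List.mem_map.mpr ⟨e, he, by simpa using hse⟩)

-- the inner index loop, characterised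
theorem pvInnerA_spec (strat tick : String) (strats : List String) (hnd : strats.Nodup)
    (tickers : List (List String)) :
    pvInnerA strat tick strats tickers =
      if strat ∈ strats then (tickers.modify (strats.idxOf strat) (· ++ [tick]), true)
      else (tickers, false) := by
  induction strats using List.reverseRecOn generalizing tickers with
  | nil => simp [pvInnerA, PySem.List.pyRange_one_eq_nil]
  | append_singleton ss t ih =>
    have hss : ss.Nodup := hnd.of_append_left
    have hrange : PySem.List.pyRange 0 ((ss ++ [t]).length : Int) 1 =
        PySem.List.pyRange 0 (ss.length : Int) 1 ++ [(ss.length : Int)] := by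
      have : ((ss ++ [t]).length : Int) = (ss.length : Int) + 1 := by simp
      rw [this, PySem.List.pyRange_one_succ_right (by positivity)]
    unfold pvInnerA
    rw [hrange, List.foldl_append]
    have hcongr : (PySem.List.pyRange 0 (ss.length : Int) 1).foldl
        (fun (acc : List (List String) × Bool) j =>
          if PySem.List.pyGetD (ss ++ [t]) j "" = strat then
            (acc.1.modify j.toNat (· ++ [tick]), true) else acc) (tickers, false) =
        (PySem.List.pyRange 0 (ss.length : Int) 1).foldl
        (fun (acc : List (List String) × Bool) j =>
          if PySem.List.pyGetD ss j "" = strat then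
            (acc.1.modify j.toNat (· ++ [tick]), true) else acc) (tickers, false) := by
      apply PySem.List.foldl_congr_mem
      intro acc j hj
      have hjb := (PySem.List.mem_pyRange_one).1 hj
      have h0 : 0 ≤ j := hjb.1
      have hlt : j < (ss.length : Int) := hjb.2
      have hlt' : j < ((ss ++ [t]).length : Int) := by simp; omega
      rw [PySem.List.pyGetD_eq_getElem (ss ++ [t]) "" h0 hlt',
          PySem.List.pyGetD_eq_getElem ss "" h0 hlt,
          List.getElem_append_left (by omega)]
    rw [hcongr]
    have hih := ih hss tickers
    unfold pvInnerA at hih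
    rw [hih]
    have hget : PySem.List.pyGetD (ss ++ [t]) ((ss.length : Int)) "" = t := by
      rw [PySem.List.pyGetD_eq_getElem (ss ++ [t]) "" (by positivity) (by simp)]
      simp
    by_cases hmem : strat ∈ ss
    · have hts : t ≠ strat := by
        intro h; subst h
        exact (List.disjoint_of_nodup_append hnd) hmem (by simp)
      simp [hget, hts, hmem, List.idxOf_append_of_mem hmem]
    · by_cases hts : t = strat
      · subst hts
        have hidx : (ss ++ [t]).idxOf t = ss.length := by
          rw [List.idxOf_append, if_neg hmem]; simp
        simp [hget, hmem, hidx]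
      · simp [hget, hmem, hts, Ne.symm hts]

-- modifying the matched position of a mapped list, under Nodup
theorem pvModify_map (strats : List String) (hnd : strats.Nodup) (g : String → List String)
    (s : String) (hs : s ∈ strats) (tick : String) :
    (strats.map g).modify (strats.idxOf s) (· ++ [tick]) =
      strats.map (fun t => if t = s then g t ++ [tick] else g t) := by
  induction strats with
  | nil => cases hs
  | cons t rest ih =>
    by_cases hts : t = s
    · subst hts
      have hnr : t ∉ rest := (List.nodup_cons.1 hnd).1
      simp only [List.map_cons, List.idxOf_cons_self, List.modify_zero_cons]
      congr 1
      refine (List.map_congr_left ?_).symm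
      intro x hx
      have hxt : x ≠ t := fun h => hnr (h ▸ hx)
      simp [hxt]
    · have hs' : s ∈ rest := by
        cases hs with
        | head => exact absurd rfl hts
        | tail _ h => exact h
      have hidx : (t :: rest).idxOf s = rest.idxOf s + 1 := by
        simp [List.idxOf_cons, hts]
      rw [List.map_cons, hidx, List.modify_succ_cons, List.map_cons,
          ih (List.nodup_cons.1 hnd).2 hs']
      simp [hts]

-- one outer step preserves the B-shaped invariant
theorem pvStepA_invariant (p : List (List String)) (e : List String) :
    pvStepA ((pvDistinct p).map (pvGroup p), pvDistinct p) e =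
      ((pvDistinct (p ++ [e])).map (pvGroup (p ++ [e])), pvDistinct (p ++ [e])) := by
  have hnd := pvNodup_distinct p
  unfold pvStepA
  rw [pvInnerA_spec _ _ _ hnd]
  by_cases hmem : pvStratOf e ∈ pvDistinct p
  · rw [if_pos hmem]
    rw [pvModify_map _ hnd _ _ hmem]
    rw [pvDistinct_append_singleton, if_pos hmem]
    refine Prod.ext ?_ rfl
    refine List.map_congr_left ?_
    intro t _
    rw [pvGroup_append_singleton]
    by_cases hts : t = pvStratOf e
    · simp [hts]
    · simp [hts, Ne.symm hts]
  · rw [if_neg hmem]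
    have hfalse : (((pvDistinct p).map (pvGroup p), false) :
        List (List String) × Bool).2 = false := rfl
    simp only [hfalse, Bool.false_eq_true, if_false]
    rw [pvDistinct_append_singleton, if_neg hmem]
    refine Prod.ext ?_ rfl
    simp only [List.map_append, List.map_cons, List.map_nil]
    congr 1
    · refine List.map_congr_left ?_
      intro t ht
      rw [pvGroup_append_singleton]
      have hts : pvStratOf e ≠ t := fun h => hmem (h ▸ ht)
      simp [hts]
    · rw [pvGroup_append_singleton, pvGroup_eq_nil p _ hmem]
      simp

theorem pvFold_invariant (ts p : List (List String)) :
    ts.foldl pvStepA ((pvDistinct p).map (pvGroup p), pvDistinct p) =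
      ((pvDistinct (p ++ ts)).map (pvGroup (p ++ ts)), pvDistinct (p ++ ts)) := by
  induction ts generalizing p with
  | nil => simp
  | cons e rest ih =>
    rw [List.foldl_cons, pvStepA_invariant, ih (p ++ [e])]
    simp

-- ===== VERDICT (by name: the statement is the Claim_ definition above) =====
theorem separateStrategies_spec : Claim_equal_separateStrategies := by
  intro ts _ _
  unfold Spec_separateStrategies separateStrategies separateStrategies_alt
  have h := pvFold_invariant ts []
  simpa [pvDistinct] using h
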